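-- pv_equiv track=rewrite | github.com/zlenyk/NNCodesAndProjects | Graph recognition/utils.py | check_blobs
-- ===== SOURCE A (Python) =====
-- import math, matplotlib
--
-- def distance(p1, p2):
--     return int(math.sqrt((p1[0]-p2[0])*(p1[0]-p2[0])+(p1[1]-p2[1])*(p1[1]-p2[1])))
--
-- def check_blobs(blobs):
--     new_centroids = []
--     for blob in blobs:
--         y, x, r = blob
--         blocking_centroid = [(_y,_x,_r) for _y,_x,_r in new_centroids if distance([y,x], [_y, _x]) < 30]
--         if len(blocking_centroid) == 0:
--             new_centroids.append(blob)
--     return new_centroids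
-- ===== SOURCE B (Python) =====
-- def check_blobs(blobs):
--     new_centroids = []
--     grid = {}
--     for blob in blobs:
--         y, x, r = blob
--         cy, cx = y // 30, x // 30
--         blocked = False
--         for dy in (-1, 0, 1):
--             for dx in (-1, 0, 1):
--                 for _y, _x, _r in grid.get((cy + dy, cx + dx), []):
--                     if (y - _y) * (y - _y) + (x - _x) * (x - _x) < 900:
--                         blocked = True
--         if not blocked:
--             new_centroids.append(blob)
--             grid.setdefault((cy, cx), []).append(blob)
--     return new_centroids
-- ===== Notes on version B (the rewrite author's own statement) =====
-- stated objective: faster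
-- what changed: Replaced A's linear scan of all previously accepted centroids per blob with a spatial hash grid of cell size 30, so each blob only compares against accepted centroids in the 3x3 neighbouring cells; the distance test int(sqrt(d2))<30 is replaced by the exact equivalent d2<900.
import Mathlib
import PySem

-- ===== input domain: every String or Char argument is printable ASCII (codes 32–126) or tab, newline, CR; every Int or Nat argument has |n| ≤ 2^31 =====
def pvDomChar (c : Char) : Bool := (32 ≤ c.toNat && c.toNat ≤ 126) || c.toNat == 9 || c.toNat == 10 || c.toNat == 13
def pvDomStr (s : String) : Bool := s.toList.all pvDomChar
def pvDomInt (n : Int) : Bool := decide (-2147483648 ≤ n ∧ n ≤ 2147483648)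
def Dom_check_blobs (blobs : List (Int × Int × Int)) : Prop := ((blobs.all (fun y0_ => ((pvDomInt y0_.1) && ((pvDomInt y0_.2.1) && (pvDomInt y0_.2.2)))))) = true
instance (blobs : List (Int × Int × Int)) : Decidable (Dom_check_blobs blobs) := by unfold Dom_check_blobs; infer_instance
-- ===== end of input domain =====

-- B replaces A's per-blob scan of ALL accepted centroids by a spatial hash grid of cell
-- size 30 (only the 3x3 neighbouring cells are scanned); objective: faster.

-- ===== PORT A =====
-- int(math.sqrt(d2)) is ported as the integer floor square root; exact here because the
-- result is only compared with 30 and d2 is a nonnegative integer.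
def pvDistance (p1 p2 : Int × Int) : Int :=
  ((Nat.sqrt ((p1.1 - p2.1) * (p1.1 - p2.1) + (p1.2 - p2.2) * (p1.2 - p2.2)).toNat : Nat) : Int)

def check_blobs (blobs : List (Int × Int × Int)) : List (Int × Int × Int) :=
  blobs.foldl (fun new_centroids blob =>
    let y := blob.1
    let x := blob.2.1
    let blocking_centroid := new_centroids.filter (fun p => pvDistance (y, x) (p.1, p.2.1) < 30)
    if blocking_centroid.length = 0 then new_centroids ++ [blob] else new_centroids) []

-- ===== PORT B =====
def pvBStep (st : List (Int × Int × Int) × PySem.Dict (Int × Int) (List (Int × Int × Int)))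
    (blob : Int × Int × Int) :
    List (Int × Int × Int) × PySem.Dict (Int × Int) (List (Int × Int × Int)) :=
  let y := blob.1
  let x := blob.2.1
  let cy := PySem.Int.floordiv y 30
  let cx := PySem.Int.floordiv x 30
  let blocked := [(-1 : Int), 0, 1].foldl (fun b dy =>
    [(-1 : Int), 0, 1].foldl (fun b dx =>
      (st.2.getD (cy + dy, cx + dx) []).foldl (fun b p =>
        if (y - p.1) * (y - p.1) + (x - p.2.1) * (x - p.2.1) < 900 then true else b) b) b) false
  if blocked then st
  else (st.1 ++ [blob], st.2.insert (cy, cx) (st.2.getD (cy, cx) [] ++ [blob]))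

def check_blobs_alt (blobs : List (Int × Int × Int)) : List (Int × Int × Int) :=
  (blobs.foldl pvBStep ([], PySem.Dict.empty)).1

-- ===== PRECONDITION & SPEC =====
def Spec_check_blobs (blobs : List (Int × Int × Int)) (out : List (Int × Int × Int)) : Prop := out = check_blobs_alt blobs
instance (blobs : List (Int × Int × Int)) (out : List (Int × Int × Int)) : Decidable (Spec_check_blobs blobs out) := by unfold Spec_check_blobs; infer_instance

-- ===== CLAIM (what is proved, stated in full; the proofs are below) =====
def Claim_equal_check_blobs : Prop := ∀ (blobs : List (Int × Int × Int)), Dom_check_blobs blobs → Spec_check_blobs blobs (check_blobs blobs)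

-- ===== LEMMAS AND PROOFS =====

-- squared-distance test used by B
def pvNear (y x : Int) (p : Int × Int × Int) : Bool :=
  (y - p.1) * (y - p.1) + (x - p.2.1) * (x - p.2.1) < 900

-- cell of an accepted centroid
def pvCell (p : Int × Int × Int) : Int × Int :=
  (PySem.Int.floordiv p.1 30, PySem.Int.floordiv p.2.1 30)

-- A's distance test agrees with B's squared test
theorem pvDist_iff (y x : Int) (p : Int × Int × Int) :
    (pvDistance (y, x) (p.1, p.2.1) < 30) ↔ pvNear y x p = true := by
  have h0 : 0 ≤ (y - p.1) * (y - p.1) + (x - p.2.1) * (x - p.2.1) :=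
    add_nonneg (mul_self_nonneg _) (mul_self_nonneg _)
  simp only [pvDistance, pvNear, decide_eq_true_eq]
  have hs := Nat.sqrt_lt (m := ((y - p.1) * (y - p.1) + (x - p.2.1) * (x - p.2.1)).toNat) (n := 30)
  omega

-- closeness forces the cells to be neighbours
theorem pvNear_cell (y x : Int) (p : Int × Int × Int) (h : pvNear y x p = true) :
    ∃ dy ∈ [(-1 : Int), 0, 1], ∃ dx ∈ [(-1 : Int), 0, 1],
      pvCell p = (PySem.Int.floordiv y 30 + dy, PySem.Int.floordiv x 30 + dx) := by
  simp only [pvNear, decide_eq_true_eq] at h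
  have hy : (y - p.1) * (y - p.1) < 900 := by nlinarith [mul_self_nonneg (x - p.2.1)]
  have hx : (x - p.2.1) * (x - p.2.1) < 900 := by nlinarith [mul_self_nonneg (y - p.1)]
  have hy' : -29 ≤ y - p.1 ∧ y - p.1 ≤ 29 := by constructor <;> nlinarith
  have hx' : -29 ≤ x - p.2.1 ∧ x - p.2.1 ≤ 29 := by constructor <;> nlinarith
  rw [PySem.Int.floordiv_eq_ediv_of_pos (by norm_num), PySem.Int.floordiv_eq_ediv_of_pos (by norm_num)]
  simp only [pvCell, PySem.Int.floordiv_eq_ediv_of_pos (show (0:Int) < 30 by norm_num)]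
  refine ⟨p.1 / 30 - y / 30, ?_, p.2.1 / 30 - x / 30, ?_, by simp⟩ <;> simp <;> omega

-- fold shapes
theorem foldl_if_true (l : List α) (f : α → Bool) (b : Bool) :
    l.foldl (fun b p => if f p = true then true else b) b = (b || l.any f) := by
  induction l generalizing b with
  | nil => simp
  | cons a t ih =>
    rw [List.foldl_cons]
    by_cases h : f a = true
    · rw [if_pos h, ih]; simp [h]
    · rw [if_neg h, ih]; simp [h]

theorem foldl_or (l : List α) (f : α → Bool) (b : Bool) :
    l.foldl (fun b p => b || f p) b = (b || l.any f) := by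
  induction l generalizing b with
  | nil => simp
  | cons a t ih => simp [List.foldl_cons, ih, Bool.or_assoc]

-- the grid invariant: every cell holds exactly the accepted centroids of that cell
def pvInv (res : List (Int × Int × Int))
    (grid : PySem.Dict (Int × Int) (List (Int × Int × Int))) : Prop :=
  ∀ k : Int × Int, grid.getD k [] = res.filter (fun p => pvCell p = k)

-- under the invariant, B's blocked flag is A's "some accepted centroid is near"
theorem pvBlocked_eq (y x : Int) (res : List (Int × Int × Int))
    (grid : PySem.Dict (Int × Int) (List (Int × Int × Int))) (hinv : pvInv res grid) :
    ([(-1 : Int), 0, 1].foldl (fun b dy =>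
      [(-1 : Int), 0, 1].foldl (fun b dx =>
        (grid.getD (PySem.Int.floordiv y 30 + dy, PySem.Int.floordiv x 30 + dx) []).foldl
          (fun b p => if (y - p.1) * (y - p.1) + (x - p.2.1) * (x - p.2.1) < 900 then true else b)
          b) b) false)
    = res.any (fun p => pvNear y x p) := by
  have inner : ∀ (key : Int × Int) (b : Bool),
      (grid.getD key []).foldl
          (fun b p => if (y - p.1) * (y - p.1) + (x - p.2.1) * (x - p.2.1) < 900 then true else b) b
        = (b || (grid.getD key []).any (fun p => pvNear y x p)) := by
    intro key b
    have := foldl_if_true (grid.getD key []) (fun p => pvNear y x p) b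
    simpa [pvNear] using this
  simp only [inner]
  rw [show (fun (b : Bool) (dy : Int) =>
      [(-1 : Int), 0, 1].foldl (fun b dx =>
        b || (grid.getD (PySem.Int.floordiv y 30 + dy, PySem.Int.floordiv x 30 + dx) []).any
          (fun p => pvNear y x p)) b)
    = (fun (b : Bool) (dy : Int) =>
      b || [(-1 : Int), 0, 1].any (fun dx =>
        (grid.getD (PySem.Int.floordiv y 30 + dy, PySem.Int.floordiv x 30 + dx) []).any
          (fun p => pvNear y x p))) from funext fun b => funext fun dy => foldl_or _ _ _]
  rw [foldl_or]
  simp only [Bool.false_or]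
  apply Bool.eq_iff_iff.2
  simp only [List.any_eq_true]
  constructor
  · rintro ⟨dy, hdy, dx, hdx, p, hp, hnear⟩
    rw [hinv] at hp
    exact ⟨p, (List.mem_filter.1 hp).1, hnear⟩
  · rintro ⟨p, hp, hnear⟩
    obtain ⟨dy, hdy, dx, hdx, hcell⟩ := pvNear_cell y x p hnear
    refine ⟨dy, hdy, dx, hdx, p, ?_, hnear⟩
    rw [hinv]
    exact List.mem_filter.2 ⟨hp, by simp [hcell]⟩

-- A's fold step, named for the proofs (check_blobs blobs = blobs.foldl pvAStep [] by rfl)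
def pvAStep (new_centroids : List (Int × Int × Int)) (blob : Int × Int × Int) :
    List (Int × Int × Int) :=
  let y := blob.1
  let x := blob.2.1
  let blocking_centroid := new_centroids.filter (fun p => pvDistance (y, x) (p.1, p.2.1) < 30)
  if blocking_centroid.length = 0 then new_centroids ++ [blob] else new_centroids

-- one step preserves agreement of results and the grid invariant
theorem pvStep (res : List (Int × Int × Int))
    (grid : PySem.Dict (Int × Int) (List (Int × Int × Int))) (hinv : pvInv res grid)
    (blob : Int × Int × Int) :
    (pvBStep (res, grid) blob).1 = pvAStep res blob
    ∧ pvInv (pvBStep (res, grid) blob).1 (pvBStep (res, grid) blob).2 := by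
  have hfilter : res.filter (fun p => pvDistance (blob.1, blob.2.1) (p.1, p.2.1) < 30)
      = res.filter (fun p => pvNear blob.1 blob.2.1 p) := by
    apply List.filter_congr
    intro p _
    simp [pvDist_iff]
  have hb := pvBlocked_eq blob.1 blob.2.1 res grid hinv
  by_cases hany : res.any (fun p => pvNear blob.1 blob.2.1 p) = true
  · have hblocked : (pvBStep (res, grid) blob) = (res, grid) := by
      simp only [pvBStep]
      rw [hb, hany]
      simp
    have hlen : (res.filter (fun p => pvNear blob.1 blob.2.1 p)).length ≠ 0 := by
      simp only [List.any_eq_true] at hany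
      obtain ⟨p, hp, hn⟩ := hany
      have : p ∈ res.filter (fun p => pvNear blob.1 blob.2.1 p) := List.mem_filter.2 ⟨hp, hn⟩
      intro h0
      rw [List.length_eq_zero_iff] at h0
      simp [h0] at this
    constructor
    · rw [hblocked]
      simp [pvAStep, hfilter, hlen]
    · rw [hblocked]; exact hinv
  · have hblocked : (pvBStep (res, grid) blob)
        = (res ++ [blob], grid.insert (pvCell blob) (grid.getD (pvCell blob) [] ++ [blob])) := by
      simp only [pvBStep]
      rw [hb]
      simp only [Bool.not_eq_true] at hany
      rw [hany]
      simp [pvCell]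
    have hlen : (res.filter (fun p => pvNear blob.1 blob.2.1 p)).length = 0 := by
      rw [List.length_eq_zero_iff, List.filter_eq_nil_iff]
      intro p hp
      simp only [Bool.not_eq_true]
      by_contra hc
      simp only [Bool.not_eq_false] at hc
      exact hany (List.any_eq_true.2 ⟨p, hp, hc⟩)
    constructor
    · rw [hblocked]
      simp [pvAStep, hfilter, hlen]
    · rw [hblocked]
      intro k
      rw [PySem.Dict.getD_insert]
      by_cases hk : k = pvCell blob
      · rw [if_pos hk, hinv, List.filter_append]
        simp [hk]
      · rw [if_neg hk, hinv, List.filter_append]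
        simp [hk, Ne.symm]

-- the folds agree from any pair of agreeing states
theorem pvMain (blobs : List (Int × Int × Int)) (res : List (Int × Int × Int))
    (grid : PySem.Dict (Int × Int) (List (Int × Int × Int))) (hinv : pvInv res grid) :
    (blobs.foldl pvBStep (res, grid)).1 = blobs.foldl pvAStep res := by
  induction blobs generalizing res grid with
  | nil => rfl
  | cons blob t ih =>
    obtain ⟨h1, h2⟩ := pvStep res grid hinv blob
    simp only [List.foldl_cons]
    rw [show pvBStep (res, grid) blob = ((pvBStep (res, grid) blob).1, (pvBStep (res, grid) blob).2)
      from rfl]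
    rw [ih _ _ h2, h1]

-- ===== VERDICT (by name: the statement is the Claim_ definition above) =====
theorem check_blobs_spec : Claim_equal_check_blobs := by
  intro blobs _
  unfold Spec_check_blobs check_blobs check_blobs_alt
  have hA : blobs.foldl (fun new_centroids blob =>
      let y := blob.1
      let x := blob.2.1
      let blocking_centroid := new_centroids.filter (fun p => pvDistance (y, x) (p.1, p.2.1) < 30)
      if blocking_centroid.length = 0 then new_centroids ++ [blob] else new_centroids) []
    = blobs.foldl pvAStep [] := rfl
  rw [hA]
  refine (pvMain blobs [] PySem.Dict.empty ?_).symm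
  intro k
  simp [PySem.Dict.getD_empty]
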